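-- pv_equiv track=rewrite | github.com/kaldap/advent-of-code | 2021/aoc_utils.py | dict_least_most_items
-- ===== SOURCE A (Python) =====
-- def dict_least_most_items(d: dict):
--     u = max(d.values())
--     l = min(d.values())
--     U = L = None
--     for k, v in d.items():
--         if u == v:
--             U = k
--         if l == v:
--             L = k
--     return L, U
-- ===== SOURCE B (Python) =====
-- def dict_least_most_items(d: dict):
--     items = list(d.items())
--     if not items:
--         raise ValueError("empty dict")
--     (k0, v0) = items[0]
--     mn = mx = v0
--     L = U = k0
--     for k, v in items[1:]:
--         if v < mn:
--             mn, L = v, k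
--         elif v == mn:
--             L = k
--         if v > mx:
--             mx, U = v, k
--         elif v == mx:
--             U = k
--     return L, U
-- ===== Notes on version B (the rewrite author's own statement) =====
-- stated objective: alternative
-- what changed: Replaces A's three passes (max over values, min over values, then a scan keyed on those extrema) by a single pass that tracks the running min/max together with the last key attaining each, initialized from the first item; same cost in practice since A's extra passes are C-level builtins.
import Mathlib
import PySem

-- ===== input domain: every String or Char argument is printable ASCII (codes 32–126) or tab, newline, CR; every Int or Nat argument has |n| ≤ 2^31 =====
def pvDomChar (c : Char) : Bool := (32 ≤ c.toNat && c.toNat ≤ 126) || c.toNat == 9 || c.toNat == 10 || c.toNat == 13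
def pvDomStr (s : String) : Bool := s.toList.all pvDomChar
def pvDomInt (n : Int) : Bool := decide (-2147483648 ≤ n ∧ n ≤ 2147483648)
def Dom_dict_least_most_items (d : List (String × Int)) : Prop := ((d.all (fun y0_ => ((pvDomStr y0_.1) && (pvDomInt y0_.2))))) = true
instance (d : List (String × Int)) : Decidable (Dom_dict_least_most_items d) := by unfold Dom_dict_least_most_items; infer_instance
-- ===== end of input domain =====

-- B replaces A's three passes over the values/items by a single pass tracking running min/max
-- and the last key attaining each; equal return value on every nonempty dict.

-- ===== PORT A =====
-- port of: u = max(d.values()); l = min(d.values()); then one scan keeping the last key equal to each.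
-- The .getD fallbacks ("", 0) are only reachable on the empty dict, which Pre_ excludes (max/min raise there).
def dict_least_most_items (d : List (String × Int)) : String × String :=
  let dd := PySem.Dict.ofList d
  let u : Int := (PySem.List.max? dd.values (fun y => y)).getD 0
  let l : Int := (PySem.List.min? dd.values (fun y => y)).getD 0
  let r := dd.items.foldl
    (fun (p : Option String × Option String) kv =>
      ((if l = kv.2 then some kv.1 else p.1), (if u = kv.2 then some kv.1 else p.2)))
    (none, none)
  ((r.1).getD "", (r.2).getD "")

-- ===== PORT B =====
-- port of Source B: single pass, state ((mn, L), (mx, U)) seeded from the first item.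
-- The [] branch is where Source B raises ValueError (empty dict), excluded by Pre_.
def dict_least_most_items_alt (d : List (String × Int)) : String × String :=
  match (PySem.Dict.ofList d).items with
  | [] => ("", "")
  | (k0, v0) :: rest =>
    let r := rest.foldl
      (fun (st : (Int × String) × (Int × String)) kv =>
        ((if kv.2 < st.1.1 then (kv.2, kv.1)
          else if kv.2 = st.1.1 then (st.1.1, kv.1) else st.1),
         (if kv.2 > st.2.1 then (kv.2, kv.1)
          else if kv.2 = st.2.1 then (st.2.1, kv.1) else st.2)))
      ((v0, k0), (v0, k0))
    (r.1.2, r.2.2)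

-- ===== PRECONDITION & SPEC =====
-- A raises ValueError (max() of an empty sequence) exactly when d is empty.
def Pre_dict_least_most_items (d : List (String × Int)) : Prop := d ≠ []
instance (d : List (String × Int)) : Decidable (Pre_dict_least_most_items d) := by
  unfold Pre_dict_least_most_items; infer_instance
def pvWitness_dict_least_most_items : (List (String × Int)) := [("a", 1)]

def Spec_dict_least_most_items (d : List (String × Int)) (out : String × String) : Prop := out = dict_least_most_items_alt d
instance (d : List (String × Int)) (out : String × String) : Decidable (Spec_dict_least_most_items d out) := by unfold Spec_dict_least_most_items; infer_instance

-- ===== CLAIM (what is proved, stated in full; the proofs are below) =====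
def Claim_equal_dict_least_most_items : Prop := ∀ (d : List (String × Int)), Dom_dict_least_most_items d → Pre_dict_least_most_items d → Spec_dict_least_most_items d (dict_least_most_items d)

-- ===== LEMMAS AND PROOFS =====

-- B's min-tracking step / max-tracking step, as in the port
def pvStepMin (p : Int × String) (kv : String × Int) : Int × String :=
  if kv.2 < p.1 then (kv.2, kv.1) else if kv.2 = p.1 then (p.1, kv.1) else p
def pvStepMax (p : Int × String) (kv : String × Int) : Int × String :=
  if kv.2 > p.1 then (kv.2, kv.1) else if kv.2 = p.1 then (p.1, kv.1) else p
-- A's last-key scan, keyed on a fixed value m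
def pvScan (m : Int) (acc : Option String) (l : List (String × Int)) : Option String :=
  l.foldl (fun acc kv => if m = kv.2 then some kv.1 else acc) acc

theorem pvMinfLeInit (l : List (String × Int)) (a : Int) :
    l.foldl (fun a kv => min a kv.2) a ≤ a := by
  induction l generalizing a with
  | nil => simp
  | cons x t ih =>
    simp only [List.foldl_cons]
    exact le_trans (ih (min a x.2)) (min_le_left _ _)

theorem pvMinfInitOrMem (l : List (String × Int)) (a : Int) :
    l.foldl (fun a kv => min a kv.2) a = a ∨
      ∃ kv ∈ l, kv.2 = l.foldl (fun a kv => min a kv.2) a := by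
  induction l generalizing a with
  | nil => exact Or.inl rfl
  | cons x t ih =>
    simp only [List.foldl_cons]
    rcases ih (min a x.2) with h | ⟨kv, hm, he⟩
    · rcases le_total a x.2 with hle | hle
      · left; rw [h]; exact min_eq_left hle
      · right; exact ⟨x, List.mem_cons_self, by rw [h]; exact (min_eq_right hle).symm⟩
    · right; exact ⟨kv, List.mem_cons_of_mem _ hm, he⟩

theorem pvMaxfInitLe (l : List (String × Int)) (a : Int) :
    a ≤ l.foldl (fun a kv => max a kv.2) a := by
  induction l generalizing a with
  | nil => simp
  | cons x t ih =>
    simp only [List.foldl_cons]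
    exact le_trans (le_max_left _ _) (ih (max a x.2))

theorem pvMaxfInitOrMem (l : List (String × Int)) (a : Int) :
    l.foldl (fun a kv => max a kv.2) a = a ∨
      ∃ kv ∈ l, kv.2 = l.foldl (fun a kv => max a kv.2) a := by
  induction l generalizing a with
  | nil => exact Or.inl rfl
  | cons x t ih =>
    simp only [List.foldl_cons]
    rcases ih (max a x.2) with h | ⟨kv, hm, he⟩
    · rcases le_total a x.2 with hle | hle
      · right; exact ⟨x, List.mem_cons_self, by rw [h]; exact (max_eq_right hle).symm⟩
      · left; rw [h]; exact max_eq_left hle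
    · right; exact ⟨kv, List.mem_cons_of_mem _ hm, he⟩

-- the accumulator of A's scan is irrelevant once the key value occurs in the list
theorem pvScanIrrel (l : List (String × Int)) (m : Int) (acc acc' : Option String)
    (h : ∃ kv ∈ l, kv.2 = m) : pvScan m acc l = pvScan m acc' l := by
  induction l generalizing acc acc' with
  | nil => rcases h with ⟨kv, hm, _⟩; exact absurd hm (List.not_mem_nil)
  | cons x t ih =>
    simp only [pvScan, List.foldl_cons]
    by_cases hx : m = x.2
    · simp [hx]
    · simp only [if_neg hx]
      rcases h with ⟨kv, hm, he⟩
      rcases List.mem_cons.mp hm with rfl | hmt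
      · exact absurd he.symm hx
      · exact ih _ _ ⟨kv, hmt, he⟩

-- the single-pass min tracker computes the running min together with the last key attaining it
theorem pvMinLemma (l : List (String × Int)) (mn : Int) (L : String) :
    (l.foldl pvStepMin (mn, L)).1 = l.foldl (fun a kv => min a kv.2) mn ∧
    pvScan (l.foldl pvStepMin (mn, L)).1 (some L) l = some (l.foldl pvStepMin (mn, L)).2 := by
  induction l generalizing mn L with
  | nil => exact ⟨rfl, rfl⟩
  | cons x t ih =>
    obtain ⟨k, v⟩ := x
    simp only [List.foldl_cons]
    have hstep1 : (pvStepMin (mn, L) (k, v)).1 = min mn v := by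
      simp only [pvStepMin]; split_ifs with h1 h2 <;> omega
    obtain ⟨ih1, ih2⟩ := ih (pvStepMin (mn, L) (k, v)).1 (pvStepMin (mn, L) (k, v)).2
    have hM : (t.foldl pvStepMin (pvStepMin (mn, L) (k, v))).1
        = t.foldl (fun a kv => min a kv.2) (min mn v) := by
      rw [← hstep1]; rw [ih1]
    constructor
    · exact hM
    · set M := (t.foldl pvStepMin (pvStepMin (mn, L) (k, v))).1 with hMdef
      have hMle : M ≤ min mn v := by rw [hM]; exact pvMinfLeInit t (min mn v)
      have ihinit := ih2
      rw [Prod.mk.eta] at ihinit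
      simp only [pvScan, List.foldl_cons]
      by_cases hv : M = v
      · have hstep2 : (pvStepMin (mn, L) (k, v)).2 = k := by
          simp only [pvStepMin]
          have : v ≤ mn := by omega
          split_ifs with h1 h2 <;> first | rfl | omega
        rw [if_pos hv]
        rw [hstep2] at ihinit
        exact ihinit
      · rw [if_neg hv]
        by_cases hlt : v < mn
        · have hstep2 : (pvStepMin (mn, L) (k, v)).2 = k := by
            simp only [pvStepMin, if_pos hlt]
          have hMlt : M < min mn v := lt_of_le_of_ne hMle (by
            intro hEq; exact hv (by omega))
          have hmem : ∃ kv ∈ t, kv.2 = M := by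
            rcases pvMinfInitOrMem t (min mn v) with h | h
            · exfalso; rw [hM] at hMlt; omega
            · rw [← hM] at h; exact h
          rw [hstep2] at ihinit
          exact (pvScanIrrel t M (some L) (some k) hmem).trans ihinit
        · by_cases heq : v = mn
          · have hstep2 : (pvStepMin (mn, L) (k, v)).2 = k := by
              simp only [pvStepMin, if_neg hlt, if_pos heq]
            have hMlt : M < min mn v := lt_of_le_of_ne hMle (by
              intro hEq; exact hv (by omega))
            have hmem : ∃ kv ∈ t, kv.2 = M := by
              rcases pvMinfInitOrMem t (min mn v) with h | h
              · exfalso; rw [hM] at hMlt; omega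
              · rw [← hM] at h; exact h
            rw [hstep2] at ihinit
            exact (pvScanIrrel t M (some L) (some k) hmem).trans ihinit
          · have hstep2 : (pvStepMin (mn, L) (k, v)).2 = L := by
              simp only [pvStepMin, if_neg hlt, if_neg heq]
            rw [hstep2] at ihinit
            exact ihinit

-- dual statement for the max tracker
theorem pvMaxLemma (l : List (String × Int)) (mx : Int) (U : String) :
    (l.foldl pvStepMax (mx, U)).1 = l.foldl (fun a kv => max a kv.2) mx ∧
    pvScan (l.foldl pvStepMax (mx, U)).1 (some U) l = some (l.foldl pvStepMax (mx, U)).2 := by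
  induction l generalizing mx U with
  | nil => exact ⟨rfl, rfl⟩
  | cons x t ih =>
    obtain ⟨k, v⟩ := x
    simp only [List.foldl_cons]
    have hstep1 : (pvStepMax (mx, U) (k, v)).1 = max mx v := by
      simp only [pvStepMax]; split_ifs with h1 h2 <;> omega
    obtain ⟨ih1, ih2⟩ := ih (pvStepMax (mx, U) (k, v)).1 (pvStepMax (mx, U) (k, v)).2
    have hM : (t.foldl pvStepMax (pvStepMax (mx, U) (k, v))).1
        = t.foldl (fun a kv => max a kv.2) (max mx v) := by
      rw [← hstep1]; rw [ih1]
    constructor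
    · exact hM
    · set M := (t.foldl pvStepMax (pvStepMax (mx, U) (k, v))).1 with hMdef
      have hMle : max mx v ≤ M := by rw [hM]; exact pvMaxfInitLe t (max mx v)
      have ihinit := ih2
      rw [Prod.mk.eta] at ihinit
      simp only [pvScan, List.foldl_cons]
      by_cases hv : M = v
      · have hstep2 : (pvStepMax (mx, U) (k, v)).2 = k := by
          simp only [pvStepMax]
          have : mx ≤ v := by omega
          split_ifs with h1 h2 <;> first | rfl | omega
        rw [if_pos hv]
        rw [hstep2] at ihinit
        exact ihinit
      · rw [if_neg hv]
        by_cases hgt : v > mx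
        · have hstep2 : (pvStepMax (mx, U) (k, v)).2 = k := by
            simp only [pvStepMax, if_pos hgt]
          have hMgt : max mx v < M := lt_of_le_of_ne hMle (by
            intro hEq; exact hv (by omega))
          have hmem : ∃ kv ∈ t, kv.2 = M := by
            rcases pvMaxfInitOrMem t (max mx v) with h | h
            · exfalso; rw [hM] at hMgt; omega
            · rw [← hM] at h; exact h
          rw [hstep2] at ihinit
          exact (pvScanIrrel t M (some U) (some k) hmem).trans ihinit
        · by_cases heq : v = mx
          · have hstep2 : (pvStepMax (mx, U) (k, v)).2 = k := by
              simp only [pvStepMax, if_neg hgt, if_pos heq]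
            have hMgt : max mx v < M := lt_of_le_of_ne hMle (by
              intro hEq; exact hv (by omega))
            have hmem : ∃ kv ∈ t, kv.2 = M := by
              rcases pvMaxfInitOrMem t (max mx v) with h | h
              · exfalso; rw [hM] at hMgt; omega
              · rw [← hM] at h; exact h
            rw [hstep2] at ihinit
            exact (pvScanIrrel t M (some U) (some k) hmem).trans ihinit
          · have hstep2 : (pvStepMax (mx, U) (k, v)).2 = U := by
              simp only [pvStepMax, if_neg hgt, if_neg heq]
            rw [hstep2] at ihinit
            exact ihinit

-- a dict built by inserting into a nonempty one keeps a nonempty items list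
theorem pvItemsNonempty (l : List (String × Int)) (dd : PySem.Dict String Int)
    (h : dd.items ≠ []) :
    (l.foldl (fun acc p => acc.insert p.1 p.2) dd).items ≠ [] := by
  induction l generalizing dd with
  | nil => exact h
  | cons x t ih =>
    simp only [List.foldl_cons]
    apply ih
    rw [PySem.Dict.items_insert]
    split_ifs with hc
    · simpa using h
    · simp

theorem pvOfListItemsNonempty (d : List (String × Int)) (h : d ≠ []) :
    (PySem.Dict.ofList d).items ≠ [] := by
  obtain ⟨x, t, rfl⟩ := List.exists_cons_of_ne_nil h
  show ((PySem.Dict.empty.insert x.1 x.2 : PySem.Dict String Int).update t).items ≠ []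
  apply pvItemsNonempty
  rw [PySem.Dict.items_insert]
  have hc : (PySem.Dict.empty : PySem.Dict String Int).contains x.1 = false := PySem.Dict.contains_empty x.1
  rw [hc]
  simp [PySem.Dict.empty]

-- ===== VERDICT (by name: the statement is the Claim_ definition above) =====
theorem dict_least_most_items_spec : Claim_equal_dict_least_most_items := by
  intro d _ hpre
  unfold Spec_dict_least_most_items dict_least_most_items dict_least_most_items_alt
  have hne := pvOfListItemsNonempty d hpre
  obtain ⟨⟨k0, v0⟩, rest, hitems⟩ := List.exists_cons_of_ne_nil hne
  rw [hitems]
  simp only []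
  -- A's values list
  have hvals : (PySem.Dict.ofList d).values = v0 :: rest.map Prod.snd := by
    simp only [PySem.Dict.values, hitems, List.map_cons]
  -- extrema as folds over the items
  have hu : (PySem.List.max? (PySem.Dict.ofList d).values (fun y => y)).getD 0
      = rest.foldl (fun a kv => max a kv.2) v0 := by
    rw [hvals, PySem.List.max?_id_cons, Option.getD_some, List.foldl_map]
  have hl : (PySem.List.min? (PySem.Dict.ofList d).values (fun y => y)).getD 0
      = rest.foldl (fun a kv => min a kv.2) v0 := by
    rw [hvals, PySem.List.min?_id_cons, Option.getD_some, List.foldl_map]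
  rw [hu, hl, hitems]
  -- split both pair-state folds into their independent components
  have hsplitA : (List.foldl
        (fun (p : Option String × Option String) (kv : String × Int) =>
          (if List.foldl (fun a kv => min a kv.2) v0 rest = kv.2 then some kv.1 else p.1,
           if List.foldl (fun a kv => max a kv.2) v0 rest = kv.2 then some kv.1 else p.2))
        (none, none) ((k0, v0) :: rest))
      = (List.foldl (fun (a : Option String) (kv : String × Int) =>
            if List.foldl (fun a kv => min a kv.2) v0 rest = kv.2 then some kv.1 else a) none
            ((k0, v0) :: rest),
         List.foldl (fun (a : Option String) (kv : String × Int) =>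
            if List.foldl (fun a kv => max a kv.2) v0 rest = kv.2 then some kv.1 else a) none
            ((k0, v0) :: rest)) :=
    PySem.List.foldl_prod_mk
      (fun (a : Option String) (kv : String × Int) =>
        if List.foldl (fun a kv => min a kv.2) v0 rest = kv.2 then some kv.1 else a)
      (fun (a : Option String) (kv : String × Int) =>
        if List.foldl (fun a kv => max a kv.2) v0 rest = kv.2 then some kv.1 else a)
      ((k0, v0) :: rest) none none
  have hsplitB : (List.foldl
        (fun (st : (Int × String) × (Int × String)) (kv : String × Int) =>
          ((if kv.2 < st.1.1 then (kv.2, kv.1)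
            else if kv.2 = st.1.1 then (st.1.1, kv.1) else st.1),
           (if kv.2 > st.2.1 then (kv.2, kv.1)
            else if kv.2 = st.2.1 then (st.2.1, kv.1) else st.2)))
        ((v0, k0), (v0, k0)) rest)
      = (rest.foldl pvStepMin (v0, k0), rest.foldl pvStepMax (v0, k0)) :=
    PySem.List.foldl_prod_mk pvStepMin pvStepMax rest (v0, k0) (v0, k0)
  rw [hsplitA, hsplitB]
  obtain ⟨hmin1, hmin2⟩ := pvMinLemma rest v0 k0
  obtain ⟨hmax1, hmax2⟩ := pvMaxLemma rest v0 k0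
  -- min component
  have hLm : rest.foldl (fun a kv => min a kv.2) v0 = (rest.foldl pvStepMin (v0, k0)).1 :=
    hmin1.symm
  have hLscan : pvScan (rest.foldl pvStepMin (v0, k0)).1 (some k0) rest
      = some (rest.foldl pvStepMin (v0, k0)).2 := hmin2
  have hUm : rest.foldl (fun a kv => max a kv.2) v0 = (rest.foldl pvStepMax (v0, k0)).1 :=
    hmax1.symm
  have hUscan : pvScan (rest.foldl pvStepMax (v0, k0)).1 (some k0) rest
      = some (rest.foldl pvStepMax (v0, k0)).2 := hmax2
  have hAmin : List.foldl (fun (a : Option String) (kv : String × Int) =>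
        if rest.foldl (fun a kv => min a kv.2) v0 = kv.2 then some kv.1 else a) none
        ((k0, v0) :: rest) = some (rest.foldl pvStepMin (v0, k0)).2 := by
    simp only [List.foldl_cons]
    by_cases h0 : rest.foldl (fun a kv => min a kv.2) v0 = v0
    · rw [if_pos h0, hLm]; exact hLscan
    · rw [if_neg h0]
      have hmem : ∃ kv ∈ rest, kv.2 = (rest.foldl pvStepMin (v0, k0)).1 := by
        rcases pvMinfInitOrMem rest v0 with h | h
        · exact absurd h h0
        · rw [hLm] at h; exact h
      rw [hLm]
      rw [show (List.foldl (fun (a : Option String) (kv : String × Int) =>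
            if (rest.foldl pvStepMin (v0, k0)).1 = kv.2 then some kv.1 else a) none rest)
          = pvScan (rest.foldl pvStepMin (v0, k0)).1 none rest from rfl]
      rw [pvScanIrrel rest _ none (some k0) hmem]
      exact hLscan
  have hAmax : List.foldl (fun (a : Option String) (kv : String × Int) =>
        if rest.foldl (fun a kv => max a kv.2) v0 = kv.2 then some kv.1 else a) none
        ((k0, v0) :: rest) = some (rest.foldl pvStepMax (v0, k0)).2 := by
    simp only [List.foldl_cons]
    by_cases h0 : rest.foldl (fun a kv => max a kv.2) v0 = v0
    · rw [if_pos h0, hUm]; exact hUscan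
    · rw [if_neg h0]
      have hmem : ∃ kv ∈ rest, kv.2 = (rest.foldl pvStepMax (v0, k0)).1 := by
        rcases pvMaxfInitOrMem rest v0 with h | h
        · exact absurd h h0
        · rw [hUm] at h; exact h
      rw [hUm]
      rw [show (List.foldl (fun (a : Option String) (kv : String × Int) =>
            if (rest.foldl pvStepMax (v0, k0)).1 = kv.2 then some kv.1 else a) none rest)
          = pvScan (rest.foldl pvStepMax (v0, k0)).1 none rest from rfl]
      rw [pvScanIrrel rest _ none (some k0) hmem]
      exact hUscan
  rw [hAmin, hAmax]
  simp
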